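-- pv_equiv track=rewrite | github.com/greatertomi/problem-solving | algorithms/hard/matrix-layer-rotation.py | processInternals
-- ===== SOURCE A (Python) =====
-- def processInternals(arr):
--     colLen = len(arr)
--     rowLen = len(arr[0])
--     array = []
--     kept = []
--     internal = []
--     for i in range(colLen):
--         if i == 0:
--             array.extend(arr[i])
--         elif i == colLen - 1:
--             array.extend(arr[i][::-1])
--         else:
--             array.append(arr[i][-1])
--             internal.append(arr[i][1:-1])
--             kept.append(arr[i][0])
--     array = array + kept
--     return array, internal
-- ===== SOURCE B (Python) =====
-- def processInternals(arr):
--     # Recursive structural decomposition: peel the top row, then recurse down the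
--     # remaining rows, building the right-edge-plus-reversed-bottom ring segment,
--     # the left column and the internal strip on the way back up.
--     def go(rows):
--         head, rest = rows[0], rows[1:]
--         if not rest:
--             return head[::-1], [], []
--         ring_tail, lefts, internal = go(rest)
--         return [head[-1]] + ring_tail, [head[0]] + lefts, [head[1:-1]] + internal
--     top = list(arr[0])
--     if len(arr) == 1:
--         return top, []
--     ring_tail, lefts, internal = go(arr[1:])
--     return top + ring_tail + lefts, internal
-- ===== Notes on version B (the rewrite author's own statement) =====
-- stated objective: alternative
-- what changed: Replaces A's single index loop with i==0/i==last/else branching over three mutated accumulators by a recursion on the list of rows: peel the top row, recurse structurally down the tail, and cons the right edge (merged with the reversed bottom row at the base case), left column and internal strip on the way back up.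
import Mathlib
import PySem

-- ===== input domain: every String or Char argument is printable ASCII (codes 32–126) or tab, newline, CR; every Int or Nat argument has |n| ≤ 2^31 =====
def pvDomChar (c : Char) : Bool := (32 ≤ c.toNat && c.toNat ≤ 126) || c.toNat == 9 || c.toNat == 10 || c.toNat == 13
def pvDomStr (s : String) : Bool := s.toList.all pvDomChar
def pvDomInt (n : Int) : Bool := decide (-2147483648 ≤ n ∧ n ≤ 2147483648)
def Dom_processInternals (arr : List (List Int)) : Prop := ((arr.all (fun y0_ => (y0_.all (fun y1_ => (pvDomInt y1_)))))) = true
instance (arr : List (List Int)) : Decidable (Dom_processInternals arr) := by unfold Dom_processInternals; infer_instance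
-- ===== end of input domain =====

-- B replaces A's index loop with per-row branching by a structural recursion on the rows; return values are proved equal on Pre_.

-- ===== PORT A =====
-- literal port of A's loop: state (array, kept, internal), branch on i == 0 / i == colLen-1 / else
def processInternals (arr : List (List Int)) : List Int × List (List Int) :=
  let colLen : Int := arr.length
  let _rowLen : Int := (PySem.List.pyGetD arr 0 []).length
  let st := (PySem.List.pyRange 0 colLen 1).foldl
    (fun (s : List Int × List Int × List (List Int)) i =>
      let row := PySem.List.pyGetD arr i []
      if i = 0 then (s.1 ++ row, s.2.1, s.2.2)
      else if i = colLen - 1 then (s.1 ++ row.reverse, s.2.1, s.2.2)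
      else (s.1 ++ [PySem.List.pyGetD row (-1) 0],
            s.2.1 ++ [PySem.List.pyGetD row 0 0],
            s.2.2 ++ [PySem.List.slice row (some 1) (some (-1))]))
    ([], [], [])
  (st.1 ++ st.2.1, st.2.2)

-- ===== PORT B =====
-- port of Source B's inner recursive 'go': on the last row return its reverse, otherwise
-- cons head[-1], head[0] and head[1:-1] onto the recursive results for the tail
def goB : List (List Int) → List Int × List Int × List (List Int)
  | [] => ([], [], [])  -- unreachable: go is only called on nonempty row lists
  | [head] => (head.reverse, [], [])
  | head :: rest =>
    let r := goB rest
    (PySem.List.pyGetD head (-1) 0 :: r.1,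
     PySem.List.pyGetD head 0 0 :: r.2.1,
     PySem.List.slice head (some 1) (some (-1)) :: r.2.2)

def processInternals_alt (arr : List (List Int)) : List Int × List (List Int) :=
  let top := PySem.List.pyGetD arr 0 []
  if (arr.length : Int) = 1 then (top, [])
  else
    let r := goB (PySem.List.slice arr (some 1) none)
    (top ++ r.1 ++ r.2.1, r.2.2)

-- ===== PRECONDITION & SPEC =====
-- Pre_ excludes exactly the inputs where the Python A raises: the empty matrix (arr[0] → IndexError)
-- and any interior row that is empty (arr[i][-1] → IndexError); B raises there too.
def Pre_processInternals (arr : List (List Int)) : Prop :=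
  arr ≠ [] ∧ ∀ i : Nat, 1 ≤ i → i + 1 < arr.length → arr.getD i [] ≠ []
instance (arr : List (List Int)) : Decidable (Pre_processInternals arr) := by
  unfold Pre_processInternals
  exact instDecidableAnd
    (dq := decidable_of_iff (∀ i, i < arr.length → 1 ≤ i → i + 1 < arr.length → arr.getD i [] ≠ [])
      ⟨fun h i h1 h2 => h i (by omega) h1 h2, fun h i _ h1 h2 => h i h1 h2⟩)

def pvWitness_processInternals : List (List Int) := [[1, 2], [3, 4], [5, 6]]

def Spec_processInternals (arr : List (List Int)) (out : List Int × List (List Int)) : Prop := out = processInternals_alt arr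
instance (arr : List (List Int)) (out : List Int × List (List Int)) : Decidable (Spec_processInternals arr out) := by unfold Spec_processInternals; infer_instance

-- ===== CLAIM (what is proved, stated in full; the proofs are below) =====
def Claim_equal_processInternals : Prop := ∀ (arr : List (List Int)), Dom_processInternals arr → Pre_processInternals arr → Spec_processInternals arr (processInternals arr)

-- ===== LEMMAS AND PROOFS =====

-- the middle of A's fold: on indices all strictly between 0 and colLen-1, only the else branch fires
theorem foldA_mid (arr : List (List Int)) (n : Int) (l : List Int)
    (hl : ∀ i ∈ l, 1 ≤ i ∧ i < n - 1) (s : List Int × List Int × List (List Int)) :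
    l.foldl
      (fun (s : List Int × List Int × List (List Int)) i =>
        let row := PySem.List.pyGetD arr i []
        if i = 0 then (s.1 ++ row, s.2.1, s.2.2)
        else if i = n - 1 then (s.1 ++ row.reverse, s.2.1, s.2.2)
        else (s.1 ++ [PySem.List.pyGetD row (-1) 0],
              s.2.1 ++ [PySem.List.pyGetD row 0 0],
              s.2.2 ++ [PySem.List.slice row (some 1) (some (-1))])) s
    = (s.1 ++ l.map (fun i => PySem.List.pyGetD (PySem.List.pyGetD arr i []) (-1) 0),
       s.2.1 ++ l.map (fun i => PySem.List.pyGetD (PySem.List.pyGetD arr i []) 0 0),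
       s.2.2 ++ l.map (fun i => PySem.List.slice (PySem.List.pyGetD arr i []) (some 1) (some (-1)))) := by
  induction l generalizing s with
  | nil => simp
  | cons a t ih =>
    have ha := hl a (by simp)
    have h0 : ¬ a = 0 := by omega
    have h1 : ¬ a = n - 1 := by omega
    simp only [List.foldl_cons, List.map_cons, h0, h1, if_false]
    rw [ih (fun i hi => hl i (by simp [hi]))]
    simp

-- B's recursion on mids ++ [bot] computes the three row maps plus the reversed bottom
theorem goB_eq (mids : List (List Int)) (bot : List Int) :
    goB (mids ++ [bot])
    = (mids.map (fun row => PySem.List.pyGetD row (-1) 0) ++ bot.reverse,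
       mids.map (fun row => PySem.List.pyGetD row 0 0),
       mids.map (fun row => PySem.List.slice row (some 1) (some (-1)))) := by
  induction mids with
  | nil => simp [goB]
  | cons h t ih =>
    cases t with
    | nil => simp [goB]
    | cons h2 t2 =>
      simp only [List.cons_append] at ih ⊢
      simp [goB, ih]

theorem processInternals_spec' (arr : List (List Int)) (h : Pre_processInternals arr) :
    processInternals arr = processInternals_alt arr := by
  obtain ⟨hne, _⟩ := h
  unfold processInternals processInternals_alt
  dsimp only
  by_cases h1 : (arr.length : Int) = 1
  · -- single row: A's loop runs once through the i = 0 branch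
    rw [show PySem.List.pyRange 0 (arr.length : Int) 1 = [0] by rw [h1]; decide]
    simp [h1]
  · -- at least two rows: split range(0, n) into [0] ++ range(1, n-1) ++ [n-1]
    have hlen : 2 ≤ arr.length := by
      have := List.length_pos_of_ne_nil hne
      omega
    have hsplit : PySem.List.pyRange 0 (arr.length : Int) 1
        = 0 :: (PySem.List.pyRange 1 ((arr.length : Int) - 1) 1 ++ [(arr.length : Int) - 1]) := by
      rw [PySem.List.pyRange_one_cons (by omega)]
      congr 1
      rw [show (arr.length : Int) = ((arr.length : Int) - 1) + 1 by ring,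
          PySem.List.pyRange_one_succ_right (by omega)]
      ring_nf
    have hlastne : ¬ ((arr.length : Int) - 1 = 0) := by omega
    have h0ne : ¬ ((0 : Int) = (arr.length : Int) - 1) := by omega
    -- indexing range(1, n) covers exactly the dropped-head rows
    have hdrop : (PySem.List.pyRange 1 (arr.length : Int) 1).map
        (fun j => PySem.List.pyGetD arr j []) = arr.drop 1 := by
      simpa using PySem.List.map_pyGetD_pyRange arr [] (a := 1) (by norm_num)
    rw [show (arr.length : Int) = ((arr.length : Int) - 1) + 1 by ring,
        PySem.List.pyRange_one_succ_right (by omega), List.map_append] at hdrop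
    have hmid : (PySem.List.pyRange 1 ((arr.length : Int) - 1) 1).map
        (fun j => PySem.List.pyGetD arr j []) = (arr.drop 1).dropLast := by
      rw [← hdrop]; simp
    have hdrop1 : arr.drop 1 = (arr.drop 1).dropLast ++ [PySem.List.pyGetD arr ((arr.length : Int) - 1) []] := by
      rw [← hmid, ← hdrop]; simp
    rw [hsplit]
    simp only [List.foldl_cons, List.foldl_append, List.foldl_nil, if_true,
      if_neg hlastne, if_neg h0ne, if_neg h1, List.nil_append]
    rw [foldA_mid arr (arr.length : Int) _
        (fun i hi => by rw [PySem.List.mem_pyRange_one] at hi; exact ⟨hi.1, hi.2⟩)]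
    -- B side: arr[1:] = dropLast ++ [bottom row], then goB_eq
    rw [show PySem.List.slice arr (some 1) none = arr.drop 1 by
          simp [PySem.List.slice_from_one, List.drop_one]]
    rw [hdrop1, goB_eq]
    -- both sides are the same five segments; convert A's index maps to row maps
    simp only [← hmid, List.map_map]
    simp [Function.comp_def, List.append_assoc]

-- ===== VERDICT (by name: the statement is the Claim_ definition above) =====
theorem processInternals_spec : Claim_equal_processInternals := by
  intro arr _ hpre
  exact processInternals_spec' arr hpre
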